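-- pv_equiv track=rewrite | github.com/tjcrims0nx/Abadd0n-4B | main.py | _trailing_backtick_run
-- ===== SOURCE A (Python) =====
-- def _trailing_backtick_run(s: str) -> int:
--     n = 0
--     for c in reversed(s):
--         if c == "`":
--             n += 1
--         else:
--             break
--     return n
-- ===== SOURCE B (Python) =====
-- def _trailing_backtick_run(s: str) -> int:
--     return len(s) - len(s.rstrip("`"))
-- ===== Notes on version B (the rewrite author's own statement) =====
-- stated objective: simpler
-- what changed: Replaces the explicit reversed-for loop with a counter and break by a single closed-form expression: strip the trailing backtick run with rstrip and return the length difference.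
import Mathlib
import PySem

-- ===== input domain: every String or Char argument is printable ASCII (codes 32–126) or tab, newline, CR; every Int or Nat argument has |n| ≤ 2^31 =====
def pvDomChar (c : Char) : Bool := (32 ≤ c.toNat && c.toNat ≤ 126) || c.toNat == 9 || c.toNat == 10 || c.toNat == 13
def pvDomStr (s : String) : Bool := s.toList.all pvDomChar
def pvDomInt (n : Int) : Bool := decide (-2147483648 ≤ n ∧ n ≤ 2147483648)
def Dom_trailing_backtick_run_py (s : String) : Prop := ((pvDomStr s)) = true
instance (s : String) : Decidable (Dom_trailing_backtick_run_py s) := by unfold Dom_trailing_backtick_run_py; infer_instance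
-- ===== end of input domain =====

-- B strips the maximal trailing backtick run with rstrip("`") and returns the length difference,
-- instead of A's reversed-iteration counter loop with break. Same value on every input.

-- ===== PORT A =====
-- the 'for c in reversed(s): if c == "`": n += 1 else: break' loop, with n the accumulator;
-- reaching 'else' is the break: the current n is returned
def pvLoopA : List Char → Int → Int
  | [], n => n
  | c :: rest, n => if c == '`' then pvLoopA rest (n + 1) else n

def trailing_backtick_run_py (s : String) : Int :=
  pvLoopA s.toList.reverse 0

-- ===== PORT B =====
-- s.rstrip(chars): drop from the right every character contained in chars — exact for Python's
-- str.rstrip(chars) (PySem has no right-only stripChars, so it is ported by hand here)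
def pvRstripChars (cs : List Char) (chars : List Char) : List Char :=
  (cs.reverse.dropWhile (fun c => chars.contains c)).reverse

def trailing_backtick_run_py_alt (s : String) : Int :=
  (s.toList.length : Int) - ((pvRstripChars s.toList ['`']).length : Int)

-- ===== PRECONDITION & SPEC =====
def Spec_trailing_backtick_run_py (s : String) (out : Int) : Prop := out = trailing_backtick_run_py_alt s
instance (s : String) (out : Int) : Decidable (Spec_trailing_backtick_run_py s out) := by unfold Spec_trailing_backtick_run_py; infer_instance

-- ===== CLAIM (what is proved, stated in full; the proofs are below) =====
def Claim_equal_trailing_backtick_run_py : Prop := ∀ (s : String), Dom_trailing_backtick_run_py s → Spec_trailing_backtick_run_py s (trailing_backtick_run_py s)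

-- ===== LEMMAS AND PROOFS =====

-- A's loop computes the accumulator plus the length of the leading backtick run of its list
theorem pvLoopA_eq (r : List Char) : ∀ n : Int,
    pvLoopA r n = n + ((r.takeWhile (fun c => c == '`')).length : Int) := by
  induction r with
  | nil => intro n; simp [pvLoopA]
  | cons c rest ih =>
    intro n
    by_cases h : c = '`'
    · simp [pvLoopA, h, ih]; ring
    · simp [pvLoopA, h]

-- ===== VERDICT (by name: the statement is the Claim_ definition above) =====
theorem trailing_backtick_run_py_spec : Claim_equal_trailing_backtick_run_py := by
  intro s _
  unfold Spec_trailing_backtick_run_py trailing_backtick_run_py trailing_backtick_run_py_alt pvRstripChars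
  rw [pvLoopA_eq]
  have hp : (fun c => (['`'] : List Char).contains c) = (fun c => c == '`') := by
    funext c; simp only [List.contains_cons, List.contains_nil, Bool.or_false]
  rw [hp]
  have hsplit := congrArg List.length
    (List.takeWhile_append_dropWhile (p := fun c => c == '`') (l := s.toList.reverse))
  simp only [List.length_append] at hsplit
  simp only [List.length_reverse] at *
  omega
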